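-- pv_equiv track=rewrite | github.com/hans-fritz-pommes/isbnlib | isbnlib/_data/generate.py | group_identifiers
-- ===== SOURCE A (Python) =====
-- def group_identifiers(identifiers):
--     """Group indentifier prefixes by length."""
--     groups = {}
--     for k in identifiers:
--         _, group = k.split('-')
--         if len(group) in groups:
--             groups[len(group)].append(k)
--         else:
--             groups[len(group)] = [k]
--     keys = list(groups.keys())
--     keys.sort()
--     return tuple([tuple(groups[k]) for k in keys])
-- ===== SOURCE B (Python) =====
-- def group_identifiers(identifiers):
--     """Group indentifier prefixes by length."""
--     def keylen(k):
--         _, group = k.split('-')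
--         return len(group)
--     lengths = sorted({keylen(k) for k in identifiers})
--     return tuple(tuple(k for k in identifiers if keylen(k) == n) for n in lengths)
-- ===== Notes on version B (the rewrite author's own statement) =====
-- stated objective: simpler
-- what changed: B replaces the dict-of-lists bucketing with sorting the distinct suffix lengths and taking one filter pass over the input per length; no mutable dict is built.
import Mathlib
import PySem

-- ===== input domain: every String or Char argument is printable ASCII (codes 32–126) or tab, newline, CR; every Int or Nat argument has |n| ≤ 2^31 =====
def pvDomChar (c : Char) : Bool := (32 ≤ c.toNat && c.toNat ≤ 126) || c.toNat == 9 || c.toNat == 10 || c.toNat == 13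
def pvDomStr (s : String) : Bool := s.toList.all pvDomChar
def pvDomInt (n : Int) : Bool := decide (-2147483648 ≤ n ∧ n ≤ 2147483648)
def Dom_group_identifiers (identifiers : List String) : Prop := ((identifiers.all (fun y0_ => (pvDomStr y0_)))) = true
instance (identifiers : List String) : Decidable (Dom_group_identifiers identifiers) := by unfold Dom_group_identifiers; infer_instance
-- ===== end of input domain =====

-- B replaces A's dict-of-lists bucketing by sorting the distinct suffix lengths and filtering once per length; equal return values proved on Pre_.

-- ===== PORT A =====
-- len(group) where `_, group = k.split('-')`; Pre_ guarantees the split has exactly 2 parts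
def gidKey (k : String) : Nat := (((PySem.Str.split? k "-").getD []).getD 1 "").toList.length

def group_identifiers (identifiers : List String) : List (List String) :=
  let groups : PySem.Dict Nat (List String) :=
    identifiers.foldl (fun d k =>
      if d.contains (gidKey k) then d.modify (gidKey k) [] (· ++ [k])
      else d.insert (gidKey k) [k]) PySem.Dict.empty
  let keys := PySem.List.sorted groups.keys (fun x => x) false
  keys.map (fun k => groups.getD k [])

-- ===== PORT B =====
def group_identifiers_alt (identifiers : List String) : List (List String) :=
  let lengths := PySem.List.sorted (PySem.Set.ofList (identifiers.map gidKey)) (fun x => x) false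
  lengths.map (fun n => identifiers.filter (fun k => gidKey k == n))

-- ===== PRECONDITION & SPEC =====
-- Pre_ excludes exactly the inputs where A raises ValueError: an identifier whose split on '-' does not have exactly 2 parts.
def Pre_group_identifiers (identifiers : List String) : Prop :=
  ∀ k ∈ identifiers, ((PySem.Str.split? k "-").getD []).length = 2
instance (identifiers : List String) : Decidable (Pre_group_identifiers identifiers) := by unfold Pre_group_identifiers; infer_instance

def pvWitness_group_identifiers : List String := ["978-0", "979-11", "978-1"]

def Spec_group_identifiers (identifiers : List String) (out : List (List String)) : Prop := out = group_identifiers_alt identifiers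
instance (identifiers : List String) (out : List (List String)) : Decidable (Spec_group_identifiers identifiers out) := by unfold Spec_group_identifiers; infer_instance

-- ===== CLAIM (what is proved, stated in full; the proofs are below) =====
def Claim_equal_group_identifiers : Prop := ∀ (identifiers : List String), Dom_group_identifiers identifiers → Pre_group_identifiers identifiers → Spec_group_identifiers identifiers (group_identifiers identifiers)

-- ===== LEMMAS AND PROOFS =====

-- A's if-contains/append-else-insert step is exactly dict.modify with default []
lemma step_eq_modify (d : PySem.Dict Nat (List String)) (k : String) :
    (if d.contains (gidKey k) then d.modify (gidKey k) [] (· ++ [k])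
     else d.insert (gidKey k) [k]) = d.modify (gidKey k) [] (· ++ [k]) := by
  by_cases h : d.contains (gidKey k)
  · simp [h]
  · have h2 : d.get? (gidKey k) = none :=
      (PySem.Dict.get?_eq_none_iff_contains d (gidKey k)).mpr (by simpa using h)
    simp [h, PySem.Dict.modify, PySem.Dict.getD, h2]

-- A's whole bucketing loop, rewritten as a modify-fold over (key, value) pairs
lemma groups_eq (identifiers : List String) (d : PySem.Dict Nat (List String)) :
    identifiers.foldl (fun d k =>
      if d.contains (gidKey k) then d.modify (gidKey k) [] (· ++ [k])
      else d.insert (gidKey k) [k]) d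
    = (identifiers.map (fun k => (gidKey k, k))).foldl
        (fun d p => d.modify p.1 [] (· ++ [p.2])) d := by
  have hf : (fun (d : PySem.Dict Nat (List String)) (k : String) =>
      if d.contains (gidKey k) then d.modify (gidKey k) [] (· ++ [k])
      else d.insert (gidKey k) [k])
      = fun d k => d.modify (gidKey k) [] (· ++ [k]) :=
    funext fun d => funext fun k => step_eq_modify d k
  rw [hf, List.foldl_map]

-- ===== VERDICT (by name: the statement is the Claim_ definition above) =====
theorem group_identifiers_spec : Claim_equal_group_identifiers := by
  intro identifiers _ _
  show group_identifiers identifiers = group_identifiers_alt identifiers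
  simp only [group_identifiers, group_identifiers_alt]
  rw [groups_eq]
  rw [PySem.Dict.keys_foldl_modify_key (identifiers.map (fun k => (gidKey k, k))) Prod.fst]
  have hset : PySem.Set.update ((PySem.Dict.empty : PySem.Dict Nat (List String)).keys)
      ((identifiers.map (fun k => (gidKey k, k))).map Prod.fst)
      = PySem.Set.ofList (identifiers.map gidKey) := by
    simp [PySem.Set.update, PySem.Set.ofList_eq_foldl, PySem.Dict.empty, List.map_map,
      Function.comp_def]
  rw [hset]
  apply List.map_congr_left
  intro n _
  rw [PySem.Dict.getD_foldl_modify_append]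
  simp [List.filter_map, List.map_map, Function.comp_def]
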